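-- pv_equiv track=rewrite | github.com/kienvu58/chord-sequence-modelling | refactor/generate_targets.py | get_note_pair_set
-- ===== SOURCE A (Python) =====
-- import itertools
--
-- def get_note_pair_set(note_set):
--     pair_set = list(itertools.product(note_set, note_set))
--     pair_set = set(
--         [
--             "_".join([str(note) for note in sorted(pair)])
--             for pair in pair_set
--             if pair[0] != pair[1]
--         ]
--     )
--     return pair_set
-- ===== SOURCE B (Python) =====
-- def get_note_pair_set(note_set):
--     u = list(dict.fromkeys(note_set))
--     keys = []
--     for i, a in enumerate(u):
--         for b in u[i + 1:]:
--             keys.append(f"{a}_{b}" if a < b else f"{b}_{a}")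
--     return set(keys)
-- ===== Notes on version B (the rewrite author's own statement) =====
-- stated objective: alternative
-- what changed: B deduplicates the input once with dict.fromkeys and then makes a single upper-triangular enumerate/slice pass over the m distinct values, appending one comparison-ordered f-string per unordered pair to a plain list and converting to a set once at the end, instead of A's full n*n itertools.product with a sorted() call per pair and set-deduplication of all n*n strings.
import Mathlib
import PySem

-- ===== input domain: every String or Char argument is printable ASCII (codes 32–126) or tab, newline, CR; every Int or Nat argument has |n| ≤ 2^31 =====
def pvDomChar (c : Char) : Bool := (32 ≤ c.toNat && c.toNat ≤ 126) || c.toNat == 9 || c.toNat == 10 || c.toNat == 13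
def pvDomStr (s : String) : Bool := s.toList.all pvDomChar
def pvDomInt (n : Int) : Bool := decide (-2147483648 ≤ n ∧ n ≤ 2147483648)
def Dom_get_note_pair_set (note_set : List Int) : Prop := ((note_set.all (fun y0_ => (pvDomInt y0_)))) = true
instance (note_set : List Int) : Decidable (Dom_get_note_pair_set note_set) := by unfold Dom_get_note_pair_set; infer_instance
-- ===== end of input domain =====

-- B deduplicates once (dict.fromkeys) and makes one upper-triangular pass over the
-- distinct values, emitting each unordered pair's comparison-ordered string exactly once
-- into a plain list (set() applied once at the end), instead of A's full n×n product
-- with a sorted() per pair and set-deduplication of n² strings.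

-- ===== PORT A =====
def get_note_pair_set (note_set : List Int) : List String :=
  let pair_set := note_set.flatMap (fun x => note_set.map (fun y => (x, y)))
  PySem.Set.ofList
    ((pair_set.filter (fun p => p.1 != p.2)).map
      (fun p => PySem.Str.join "_"
        ((PySem.List.sorted [p.1, p.2] (fun z => z) false).map (fun n => PySem.Int.toStr n))))

-- ===== PORT B =====
-- the conditional f-string  f"{a}_{b}" if a < b else f"{b}_{a}"  (f-string = join of its two pieces, exact)
def pvTriKey (a b : Int) : String :=
  if a < b then PySem.Str.join "_" [PySem.Int.toStr a, PySem.Int.toStr b]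
  else PySem.Str.join "_" [PySem.Int.toStr b, PySem.Int.toStr a]

def get_note_pair_set_alt (note_set : List Int) : List String :=
  let u := PySem.List.dedup note_set
  let keys := (PySem.List.enumerate u 0).foldl
    (fun ks ia => (PySem.List.slice u (some (ia.1 + 1)) none).foldl
        (fun ks b => ks ++ [pvTriKey ia.2 b]) ks) []
  PySem.Set.ofList keys

-- ===== PRECONDITION & SPEC =====
def Spec_get_note_pair_set (note_set : List Int) (out : List String) : Prop := out = get_note_pair_set_alt note_set
instance (note_set : List Int) (out : List String) : Decidable (Spec_get_note_pair_set note_set out) := by unfold Spec_get_note_pair_set; infer_instance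

-- ===== CLAIM (what is proved, stated in full; the proofs are below) =====
def Claim_equal_get_note_pair_set : Prop := ∀ (note_set : List Int), Dom_get_note_pair_set note_set → Spec_get_note_pair_set note_set (get_note_pair_set note_set)

-- ===== LEMMAS AND PROOFS =====

-- the value-ordering of one pair, and the "lo_hi" string of an already ordered pair
def pvOp (p : Int × Int) : Int × Int := if p.1 < p.2 then p else (p.2, p.1)
def pvKey2 (p : Int × Int) : String := PySem.Str.join "_" [PySem.Int.toStr p.1, PySem.Int.toStr p.2]

-- upper-triangular position pairs of a list
def pvTriP : List Int → List (Int × Int)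
  | [] => []
  | h :: t => t.map (fun y => (h, y)) ++ pvTriP t

def pvXA (v : List Int) : List (Int × Int) :=
  ((v.flatMap (fun x => v.map (fun y => (x, y)))).filter (fun p => p.1 != p.2)).map pvOp
def pvXB (u : List Int) : List (Int × Int) := (pvTriP u).map pvOp

theorem pvOp_symm (a b : Int) (h : a ≠ b) : pvOp (a, b) = pvOp (b, a) := by
  unfold pvOp; split_ifs <;> simp_all <;> omega

theorem pvTriKey_eq (a b : Int) : pvTriKey a b = pvKey2 (pvOp (a, b)) := by
  unfold pvTriKey pvOp pvKey2; split_ifs <;> rfl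

theorem pv_sorted_pair (a b : Int) :
    PySem.List.sorted [a, b] (fun z => z) false = if a ≤ b then [a, b] else [b, a] := by
  split_ifs with h
  · exact PySem.List.sorted_id_eq_of_perm_of_pairwise _ [a, b] (List.Perm.refl _) (by simp [h])
  · exact PySem.List.sorted_id_eq_of_perm_of_pairwise _ [b, a] (List.Perm.swap _ _ _) (by simp; omega)

theorem pvKeyA_eq (a b : Int) (h : a ≠ b) :
    PySem.Str.join "_" ((PySem.List.sorted [a, b] (fun z => z) false).map (fun n => PySem.Int.toStr n))
      = pvKey2 (pvOp (a, b)) := by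
  rw [pv_sorted_pair]
  unfold pvOp pvKey2
  split_ifs <;> simp_all <;> omega

-- ---- generic Set.ofList facts ----

theorem pv_discard_eq_filter {α : Type} [BEq α] [LawfulBEq α] (s : PySem.Set α) (x : α) :
    PySem.Set.discard s x = s.filter (fun y => y != x) := rfl

theorem pv_filter_comm {α : Type} (p q : α → Bool) (l : List α) :
    (l.filter q).filter p = (l.filter p).filter q := by
  rw [List.filter_filter, List.filter_filter]
  apply List.filter_congr
  intro a _
  exact Bool.and_comm _ _

theorem pv_filter_idem {α : Type} (p : α → Bool) (l : List α) :
    (l.filter p).filter p = l.filter p := by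
  rw [List.filter_filter]
  apply List.filter_congr
  intro a _
  exact Bool.and_self _

theorem pv_ofList_cons' {α : Type} [BEq α] [LawfulBEq α] (x : α) (l : List α) :
    PySem.Set.ofList (x :: l) = x :: (PySem.Set.ofList l).filter (fun y => y != x) := by
  rw [PySem.Set.ofList_cons, pv_discard_eq_filter]

-- ofList commutes with filter
theorem pv_ofList_filter {α : Type} [BEq α] [LawfulBEq α] (p : α → Bool) (l : List α) :
    PySem.Set.ofList (l.filter p) = (PySem.Set.ofList l).filter p := by
  induction l with
  | nil => rfl
  | cons y l ih =>
      by_cases hp : p y = true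
      · rw [List.filter_cons, if_pos hp, pv_ofList_cons', pv_ofList_cons', ih,
          List.filter_cons, if_pos hp]
        rw [pv_filter_comm]
      · rw [List.filter_cons, if_neg hp, pv_ofList_cons', ih, List.filter_cons, if_neg hp]
        rw [pv_filter_comm]
        symm
        apply List.filter_eq_self.2
        intro a ha
        have hpa := List.of_mem_filter ha
        have : a ≠ y := by
          intro h
          rw [h] at hpa
          exact hp hpa
        simpa using this

-- removing the x-entries of l does not change the image-set once f x is discarded
theorem pv_ofList_filter_map_filter {α β : Type} [BEq α] [LawfulBEq α] [BEq β] [LawfulBEq β]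
    (f : α → β) (x : α) (l : List α) :
    (PySem.Set.ofList ((l.filter (fun y => y != x)).map f)).filter (fun z => z != f x)
      = (PySem.Set.ofList (l.map f)).filter (fun z => z != f x) := by
  induction l with
  | nil => rfl
  | cons y l ih =>
      by_cases hy : y = x
      · subst hy
        rw [List.filter_cons]
        simp only [bne_self_eq_false, Bool.false_eq_true, if_false]
        rw [List.map_cons, pv_ofList_cons', List.filter_cons]
        simp only [bne_self_eq_false, Bool.false_eq_true, if_false]
        rw [pv_filter_idem, ih]
      · rw [List.filter_cons]
        simp only [bne_iff_ne, ne_eq, hy, not_false_eq_true, if_true]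
        rw [List.map_cons, pv_ofList_cons', List.map_cons, pv_ofList_cons',
          List.filter_cons, List.filter_cons]
        rw [pv_filter_comm (fun z => z != f x) (fun z => z != f y),
          pv_filter_comm (fun z => z != f x) (fun z => z != f y), ih]

-- deduplicating the argument list does not change ofList of its image
theorem pv_ofList_map_ofList {α β : Type} [BEq α] [LawfulBEq α] [BEq β] [LawfulBEq β]
    (f : α → β) (l : List α) :
    PySem.Set.ofList ((PySem.Set.ofList l).map f) = PySem.Set.ofList (l.map f) := by
  induction l with
  | nil => rfl
  | cons x l ih =>
      rw [pv_ofList_cons', List.map_cons, pv_ofList_cons',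
        pv_ofList_filter_map_filter f x (PySem.Set.ofList l), ih,
        List.map_cons, pv_ofList_cons']

-- foldl add: monotone, absorbs already-present elements
theorem pv_mem_foldl_add {α : Type} [BEq α] [LawfulBEq α] (L : List α) (s : PySem.Set α) (x : α)
    (h : x ∈ s) : x ∈ L.foldl PySem.Set.add s := by
  induction L generalizing s with
  | nil => exact h
  | cons y ys ih => exact ih _ ((PySem.Set.mem_add _ _ _).2 (Or.inl h))

theorem pv_foldl_add_of_mem {α : Type} [BEq α] [LawfulBEq α] (L : List α) (s : PySem.Set α)
    (h : ∀ x ∈ L, x ∈ s) : L.foldl PySem.Set.add s = s := by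
  induction L generalizing s with
  | nil => rfl
  | cons y ys ih =>
      simp only [List.foldl_cons]
      rw [PySem.Set.add_of_mem (h y (by simp))]
      exact ih s (fun x hx => h x (by simp [hx]))

-- dropping interleaved elements that are all already in s
theorem pv_foldl_skip {α β : Type} [BEq β] [LawfulBEq β] (E F : α → List β) (l : List α) :
    ∀ (s : PySem.Set β), (∀ z ∈ l, ∀ e ∈ E z, e ∈ s) →
    (l.flatMap (fun z => E z ++ F z)).foldl PySem.Set.add s
      = (l.flatMap F).foldl PySem.Set.add s := by
  induction l with
  | nil => intro s _; rfl
  | cons z l ih =>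
      intro s hs
      simp only [List.flatMap_cons, List.foldl_append]
      rw [pv_foldl_add_of_mem (E z) s (hs z (by simp))]
      exact ih _ (fun z' hz' e he =>
        pv_mem_foldl_add _ _ _ (hs z' (by simp [hz']) e he))

theorem pv_ofList_append_skip {α β : Type} [BEq β] [LawfulBEq β]
    (E F : α → List β) (l : List α) (r : List β)
    (h : ∀ z ∈ l, ∀ e ∈ E z, e ∈ r) :
    PySem.Set.ofList (r ++ l.flatMap (fun z => E z ++ F z))
      = PySem.Set.ofList (r ++ l.flatMap F) := by
  rw [PySem.Set.ofList_eq_foldl, PySem.Set.ofList_eq_foldl, List.foldl_append, List.foldl_append]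
  apply pv_foldl_skip
  intro z hz e he
  have he' : e ∈ PySem.Set.ofList r := (PySem.Set.mem_ofList _ _).2 (h z hz e he)
  rwa [PySem.Set.ofList_eq_foldl] at he' 

-- ---- triangular pairs ----

theorem pv_mem_triP (u : List Int) (p : Int × Int) (hp : p ∈ pvTriP u) :
    p.1 ∈ u ∧ p.2 ∈ u := by
  induction u with
  | nil => simp [pvTriP] at hp
  | cons h t ih =>
      simp only [pvTriP, List.mem_append, List.mem_map] at hp
      rcases hp with ⟨y, hy, rfl⟩ | hp
      · exact ⟨by simp, by simp [hy]⟩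
      · exact ⟨by simp [(ih hp).1], by simp [(ih hp).2]⟩

theorem pv_triP_ne (u : List Int) (hu : u.Nodup) (p : Int × Int) (hp : p ∈ pvTriP u) :
    p.1 ≠ p.2 := by
  induction u with
  | nil => simp [pvTriP] at hp
  | cons h t ih =>
      simp only [pvTriP, List.mem_append, List.mem_map] at hp
      rcases hp with ⟨y, hy, rfl⟩ | hp
      · intro hcontra; simp at hcontra; subst hcontra
        exact (List.nodup_cons.1 hu).1 hy
      · exact ih (List.nodup_cons.1 hu).2 hp

theorem pv_triP_filter (q : Int → Bool) (u : List Int) :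
    pvTriP (u.filter q) = (pvTriP u).filter (fun p => q p.1 && q p.2) := by
  induction u with
  | nil => rfl
  | cons h t ih =>
      by_cases hq : q h = true
      · have hrow : (t.map (fun y => (h, y))).filter (fun p => q p.1 && q p.2)
            = (t.filter q).map (fun y => (h, y)) := by
          rw [List.filter_map]
          congr 1
          apply List.filter_congr
          intro y _
          simp [hq]
        simp only [List.filter_cons, hq, if_pos]
        simp only [pvTriP, List.filter_append, ih, hrow]
      · have hrow : (t.map (fun y => (h, y))).filter (fun p => q p.1 && q p.2) = [] := by
          rw [List.filter_map, List.filter_eq_nil_iff.2]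
          · rfl
          · intro y _
            simp [hq]
        simp only [List.filter_cons, hq]
        simp only [pvTriP, List.filter_append, ih, hrow, Bool.false_eq_true, if_false,
          List.nil_append]

-- ---- the core pair-level identity ----

theorem pv_bne_comm (a b : Int) : (a != b) = (b != a) := by
  by_cases h : a = b
  · subst h; rfl
  · rw [show (a != b) = true from by simp [h], show (b != a) = true from by simp [Ne.symm h]]

theorem pvOp_pred (x : Int) (p : Int × Int) :
    ((pvOp p).1 != x && (pvOp p).2 != x) = (p.1 != x && p.2 != x) := by
  unfold pvOp
  split_ifs <;> simp [Bool.and_comm]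

theorem pv_core (v : List Int) :
    PySem.Set.ofList (pvXA v) = PySem.Set.ofList (pvXB (PySem.Set.ofList v)) := by
  induction v with
  | nil => rfl
  | cons x v' ih =>
      -- abbreviations
      have hrow : ∀ z : Int,
          List.map pvOp (List.filter (fun p => p.1 != p.2) ((x :: v').map (fun y => (z, y))))
            = (if z != x then [pvOp (z, x)] else [])
              ++ (v'.filter (fun y => z != y)).map (fun y => pvOp (z, y)) := by
        intro z
        rw [List.map_cons, List.filter_cons]
        by_cases hz : (z != x) = true
        · rw [if_pos hz, if_pos hz, List.map_cons]
          show pvOp (z, x) :: _ = pvOp (z, x) :: _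
          congr 1
          rw [List.filter_map, List.map_map]
          rfl
        · rw [if_neg hz, if_neg hz, List.filter_map, List.map_map, List.nil_append]
          rfl
      have hXA : pvXA (x :: v')
          = ((v'.filter (fun y => x != y)).map (fun y => pvOp (x, y)))
            ++ v'.flatMap (fun z =>
                 (if z != x then [pvOp (z, x)] else [])
                 ++ (v'.filter (fun y => z != y)).map (fun y => pvOp (z, y))) := by
        unfold pvXA
        rw [List.flatMap_cons, List.filter_append, List.map_append, List.filter_flatMap,
          List.map_flatMap]
        congr 1
        · rw [List.map_cons, List.filter_cons]
          simp only [bne_self_eq_false, Bool.false_eq_true, if_false]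
          rw [List.filter_map, List.map_map]
          rfl
        · congr 1
          funext z
          exact hrow z
      have hXAv' : pvXA v'
          = v'.flatMap (fun z => (v'.filter (fun y => z != y)).map (fun y => pvOp (z, y))) := by
        unfold pvXA
        rw [List.filter_flatMap, List.map_flatMap]
        congr 1
        funext z
        rw [List.filter_map, List.map_map]
        rfl
      have hstep1 : PySem.Set.ofList (pvXA (x :: v'))
          = PySem.Set.ofList (((v'.filter (fun y => x != y)).map (fun y => pvOp (x, y)))
              ++ pvXA v') := by
        rw [hXA, hXAv']
        apply pv_ofList_append_skip
        intro z hz e he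
        by_cases hzx : (z != x) = true
        · rw [if_pos hzx] at he
          have hne : z ≠ x := by simpa using hzx
          have : e = pvOp (x, z) := by
            rw [List.mem_singleton.1 he]
            exact pvOp_symm z x hne
          rw [this]
          exact List.mem_map.2 ⟨z, List.mem_filter.2 ⟨hz, by simpa using (Ne.symm hne)⟩, rfl⟩
        · rw [if_neg hzx] at he
          exact absurd he (List.not_mem_nil)
      -- the right-hand side
      rw [hstep1, pv_ofList_cons']
      have hXBcons : pvXB (x :: (PySem.Set.ofList v').filter (fun y => y != x))
          = ((PySem.Set.ofList v').filter (fun y => y != x)).map (fun y => pvOp (x, y))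
            ++ pvXB ((PySem.Set.ofList v').filter (fun y => y != x)) := by
        unfold pvXB
        rw [show pvTriP (x :: (PySem.Set.ofList v').filter (fun y => y != x))
              = ((PySem.Set.ofList v').filter (fun y => y != x)).map (fun y => (x, y))
                ++ pvTriP ((PySem.Set.ofList v').filter (fun y => y != x)) from rfl]
        rw [List.map_append, List.map_map]
        rfl
      rw [hXBcons]
      rw [PySem.Set.ofList_append, PySem.Set.update_eq_append_filter,
        PySem.Set.ofList_append, PySem.Set.update_eq_append_filter]
      have hR : PySem.Set.ofList ((v'.filter (fun y => x != y)).map (fun y => pvOp (x, y)))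
          = PySem.Set.ofList
              (((PySem.Set.ofList v').filter (fun y => y != x)).map (fun y => pvOp (x, y))) := by
        rw [List.filter_congr (fun y _ => pv_bne_comm x y),
          ← pv_ofList_map_ofList (fun y => pvOp (x, y)) (v'.filter (fun y => y != x)),
          pv_ofList_filter]
      rw [hR, ih]
      congr 1
      have hXBw : PySem.Set.ofList (pvXB ((PySem.Set.ofList v').filter (fun y => y != x)))
          = (PySem.Set.ofList (pvXB (PySem.Set.ofList v'))).filter
              (fun p => p.1 != x && p.2 != x) := by
        unfold pvXB
        rw [pv_triP_filter (fun y => y != x) (PySem.Set.ofList v'),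
          ← pv_ofList_filter, List.filter_map]
        congr 2
        exact List.filter_congr (fun p _ => (pvOp_pred x p).symm)
      rw [hXBw, List.filter_filter]
      apply List.filter_congr
      intro a ha
      by_cases hQ : (a.1 != x && a.2 != x) = true
      · rw [hQ, Bool.and_true]
      · have haR : a ∈ PySem.Set.ofList
            (((PySem.Set.ofList v').filter (fun y => y != x)).map (fun y => pvOp (x, y))) := by
          have ha' : a ∈ pvXB (PySem.Set.ofList v') := (PySem.Set.mem_ofList _ _).1 ha
          obtain ⟨q, hq, rfl⟩ := List.mem_map.1 ha'
          obtain ⟨q1, q2⟩ := q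
          have h12 := pv_mem_triP (PySem.Set.ofList v') (q1, q2) hq
          have hne12 : q1 ≠ q2 := pv_triP_ne _ (PySem.Set.nodup_ofList v') _ hq
          rw [pvOp_pred x (q1, q2)] at hQ
          have hx : q1 = x ∨ q2 = x := by
            by_contra hc
            rw [not_or] at hc
            simp [hc.1, hc.2] at hQ
          apply (PySem.Set.mem_ofList _ _).2
          rcases hx with h1 | h2
          · rw [h1]
            refine List.mem_map.2 ⟨q2, List.mem_filter.2 ⟨h12.2, ?_⟩, rfl⟩
            have : q2 ≠ x := fun h => hne12 (h1.trans h.symm)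
            simpa using this
          · have hq1x : q1 ≠ x := fun h => hne12 (h.trans h2.symm)
            rw [h2, pvOp_symm q1 x hq1x]
            exact List.mem_map.2 ⟨q1, List.mem_filter.2 ⟨h12.1, by simpa using hq1x⟩, rfl⟩
        have hc : PySem.Set.contains (PySem.Set.ofList
            (((PySem.Set.ofList v').filter (fun y => y != x)).map (fun y => pvOp (x, y)))) a
              = true := (PySem.Set.contains_iff _ _).2 haR
        rw [hc]
        simp [hQ]

-- ---- reduction of the two ports to pvXA / pvXB ----

theorem pv_A_eq (v : List Int) :
    get_note_pair_set v = PySem.Set.ofList ((pvXA v).map pvKey2) := by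
  unfold get_note_pair_set pvXA
  dsimp only
  congr 1
  rw [List.map_map]
  apply List.map_congr_left
  intro p hp
  have hne : p.1 ≠ p.2 := by simpa using (List.of_mem_filter hp)
  obtain ⟨a, b⟩ := p
  exact pvKeyA_eq a b hne

theorem pv_loop (u : List Int) (d : List Int) :
    ∀ (k : Nat) (acc : List String), d = u.drop k →
    (PySem.List.enumerate d (k : Int)).foldl
        (fun ks ia => (PySem.List.slice u (some (ia.1 + 1)) none).foldl
          (fun ks b => ks ++ [pvTriKey ia.2 b]) ks) acc
      = acc ++ (pvXB d).map pvKey2 := by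
  induction d with
  | nil => intro k acc _; simp [PySem.List.enumerate, pvXB, pvTriP]
  | cons x t ih =>
      intro k acc hd
      rw [PySem.List.enumerate_cons]
      simp only [List.foldl_cons]
      have hcast : (k : Int) + 1 = ((k + 1 : Nat) : Int) := by push_cast; ring
      have ht : t = u.drop (k + 1) := by
        rw [← List.tail_drop, ← hd]
        rfl
      have hslice : PySem.List.slice u (some ((k : Int) + 1)) none = t := by
        rw [hcast, PySem.List.slice_from_natCast, ht]
      rw [hslice, PySem.List.foldl_append_singleton_eq_map, hcast, ih (k + 1) _ ht]
      have hXB : (pvXB (x :: t)).map pvKey2 = t.map (pvTriKey x) ++ (pvXB t).map pvKey2 := by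
        unfold pvXB
        rw [show pvTriP (x :: t) = t.map (fun y => (x, y)) ++ pvTriP t from rfl]
        rw [List.map_append, List.map_append, List.map_map, List.map_map]
        congr 1
        apply List.map_congr_left
        intro y _
        exact (pvTriKey_eq x y).symm
      rw [hXB, List.append_assoc]

theorem pv_B_eq (v : List Int) :
    get_note_pair_set_alt v = PySem.Set.ofList ((pvXB (PySem.Set.ofList v)).map pvKey2) := by
  unfold get_note_pair_set_alt
  dsimp only
  rw [PySem.List.dedup_eq_ofList]
  congr 1
  have := pv_loop (PySem.Set.ofList v) (PySem.Set.ofList v) 0 [] (by simp)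
  rw [Nat.cast_zero, List.nil_append] at this
  exact this

-- ===== VERDICT (by name: the statement is the Claim_ definition above) =====
theorem get_note_pair_set_spec : Claim_equal_get_note_pair_set := by
  intro v _
  show get_note_pair_set v = get_note_pair_set_alt v
  rw [pv_A_eq, pv_B_eq, ← pv_ofList_map_ofList pvKey2 (pvXA v),
    ← pv_ofList_map_ofList pvKey2 (pvXB (PySem.Set.ofList v)), pv_core]
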